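-- pv_equiv track=rewrite | github.com/ichaudr1/hiv_polyA_struct_phylo_analysis | 00_polyA_detection/src/polyA_parsing.py | single_hp
-- ===== SOURCE A (Python) =====
-- def single_hp(vstr):
--     '''
--     Determines if there is only a single hp in a vienna string.
--
--     Parameters
--     ----------
--     vstr: str
--         The vienna string
--
--     Returns
--     -------
--         True if there is a single hairpin, false otherwise.
--     '''
--
--     num_hp = 0
--
--     opp_brak = {'(':')', ')':'('}
--     curr_brak = '('
--
--     for v in vstr:
--         if v not in opp_brak.keys():
--             continue
--         if v == opp_brak[curr_brak]:
--             num_hp += 1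
--             curr_brak = opp_brak[curr_brak]
--
--     return num_hp == 1
-- ===== SOURCE B (Python) =====
-- def single_hp(vstr):
--     '''Single-hairpin test: the bracket characters of vstr, in order, must be
--     zero-or-more '(' followed by one-or-more ')' (i.e. nondecreasing with at
--     least one ')').'''
--     brackets = [c for c in vstr if c in '()']
--     return ')' in brackets and brackets == sorted(brackets)
-- ===== Notes on version B (the rewrite author's own statement) =====
-- stated objective: idiomatic
-- what changed: Replaces A's per-character dict-lookup transition-counter state machine with a closed-form property test: keep only bracket characters and check the list is nondecreasing (equals its own sort, i.e. no open bracket after a close) and contains a close bracket.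
import Mathlib
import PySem

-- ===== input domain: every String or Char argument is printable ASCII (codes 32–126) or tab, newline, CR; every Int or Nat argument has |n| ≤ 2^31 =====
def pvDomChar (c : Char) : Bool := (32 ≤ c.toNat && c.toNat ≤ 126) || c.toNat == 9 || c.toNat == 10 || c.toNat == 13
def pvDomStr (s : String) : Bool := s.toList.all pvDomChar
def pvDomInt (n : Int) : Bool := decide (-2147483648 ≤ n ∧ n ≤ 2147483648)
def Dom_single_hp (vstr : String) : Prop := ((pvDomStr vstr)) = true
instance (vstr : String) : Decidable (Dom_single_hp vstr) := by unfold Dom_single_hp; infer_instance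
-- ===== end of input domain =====

-- B replaces A's toggling transition-counter state machine with a closed-form test on the
-- filtered bracket characters (nondecreasing, with at least one ')'); objective: idiomatic.

-- ===== PORT A =====
def pvOpp : PySem.Dict Char Char := PySem.Dict.ofList [('(', ')'), (')', '(')]

-- the loop body: skip v not in opp_brak.keys(); on v == opp_brak[curr] bump the counter and flip curr
def hpStep (s : Int × Char) (v : Char) : Int × Char :=
  if pvOpp.contains v = false then s
  else if v == pvOpp.getD s.2 ' ' then (s.1 + 1, pvOpp.getD s.2 ' ') else s
  -- opp_brak[curr_brak] is ported as getD with an unused default: curr_brak is always a key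

def single_hp (vstr : String) : Bool :=
  (vstr.toList.foldl hpStep ((0 : Int), '(')).1 == 1

-- ===== PORT B =====
def single_hp_alt (vstr : String) : Bool :=
  let brackets := vstr.toList.filter (fun c => c == '(' || c == ')')
  brackets.contains ')' && brackets == PySem.List.sorted brackets (fun x => x) false

-- ===== PRECONDITION & SPEC =====
def Spec_single_hp (vstr : String) (out : Bool) : Prop := out = single_hp_alt vstr
instance (vstr : String) (out : Bool) : Decidable (Spec_single_hp vstr out) := by unfold Spec_single_hp; infer_instance

-- ===== CLAIM (what is proved, stated in full; the proofs are below) =====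
def Claim_equal_single_hp : Prop := ∀ (vstr : String), Dom_single_hp vstr → Spec_single_hp vstr (single_hp vstr)

-- ===== LEMMAS AND PROOFS =====

theorem contains_pvOpp (c : Char) : pvOpp.contains c = (c == '(' || c == ')') := by
  have h : pvOpp = PySem.Dict.mk [('(', ')'), (')', '(')] := by decide
  rw [h]; simp [PySem.Dict.contains, List.any, BEq.comm]

theorem hpStep_skip (s : Int × Char) (v : Char) (h : ¬ (v = '(' ∨ v = ')')) : hpStep s v = s := by
  unfold hpStep
  rw [contains_pvOpp]
  simp only [beq_iff_eq]
  push Not at h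
  simp [h.1, h.2]

-- A's loop ignores non-bracket characters: it runs on the filtered bracket list
theorem foldl_hpStep_filter (l : List Char) (s : Int × Char) :
    l.foldl hpStep s = (l.filter (fun c => c == '(' || c == ')')).foldl hpStep s := by
  induction l generalizing s with
  | nil => rfl
  | cons x t ih =>
    by_cases hx : x = '(' ∨ x = ')'
    · have hb : (x == '(' || x == ')') = true := by rcases hx with h | h <;> simp [h]
      simp [hb, ih]
    · have hb : (x == '(' || x == ')') = false := by push Not at hx; simp [hx.1, hx.2]
      simp [hb, hpStep_skip s x hx, ih]

theorem pvOpp_facts : pvOpp.contains '(' = true ∧ pvOpp.contains ')' = true ∧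
    pvOpp.getD '(' ' ' = ')' ∧ pvOpp.getD ')' ' ' = '(' := by decide

theorem hpStep_oo (n : Int) : hpStep (n, '(') '(' = (n, '(') := by
  simp [hpStep, pvOpp_facts.1, pvOpp_facts.2.2.1]
theorem hpStep_oc (n : Int) : hpStep (n, '(') ')' = (n + 1, ')') := by
  simp [hpStep, pvOpp_facts.2.1, pvOpp_facts.2.2.1]
theorem hpStep_cc (n : Int) : hpStep (n, ')') ')' = (n, ')') := by
  simp [hpStep, pvOpp_facts.2.1, pvOpp_facts.2.2.2]
theorem hpStep_co (n : Int) : hpStep (n, ')') '(' = (n + 1, '(') := by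
  simp [hpStep, pvOpp_facts.1, pvOpp_facts.2.2.2]

theorem hp_mono (bs : List Char) (s : Int × Char) : s.1 ≤ (bs.foldl hpStep s).1 := by
  induction bs generalizing s with
  | nil => simp
  | cons x t ih =>
    have h : s.1 ≤ (hpStep s x).1 := by
      unfold hpStep; split_ifs <;> simp
    calc s.1 ≤ (hpStep s x).1 := h
      _ ≤ _ := ih _

-- from state ')' the counter stays put iff no '(' follows
theorem hp_close (bs : List Char) (h : ∀ c ∈ bs, c = '(' ∨ c = ')') (n : Int) :
    ((bs.foldl hpStep (n, ')')).1 = n ↔ '(' ∉ bs) := by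
  induction bs generalizing n with
  | nil => simp
  | cons x t ih =>
    rcases h x (by simp) with hx | hx <;> subst hx
    · simp only [List.foldl_cons, hpStep_co]
      constructor
      · intro he
        have := hp_mono t (n + 1, '(')
        omega
      · intro hc; exact absurd (by simp) hc
    · simp only [List.foldl_cons, hpStep_cc]
      rw [ih (fun c hc => h c (by simp [hc])) n]
      simp

-- main characterisation on bracket-only lists: counter ends at n+1 iff some ')' and nondecreasing
theorem hp_open (bs : List Char) (h : ∀ c ∈ bs, c = '(' ∨ c = ')') (n : Int) :
    ((bs.foldl hpStep (n, '(')).1 = n + 1 ↔ (')' ∈ bs ∧ bs.Pairwise (· ≤ ·))) := by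
  induction bs generalizing n with
  | nil => simp
  | cons x t ih =>
    have ht : ∀ c ∈ t, c = '(' ∨ c = ')' := fun c hc => h c (by simp [hc])
    rcases h x (by simp) with hx | hx <;> subst hx
    · simp only [List.foldl_cons, hpStep_oo]
      rw [ih ht n]
      constructor
      · rintro ⟨hm, hp⟩
        refine ⟨by simp [hm], List.Pairwise.cons ?_ hp⟩
        intro c hc
        rcases ht c hc with h' | h' <;> subst h' <;> decide
      · rintro ⟨hm, hp⟩
        rcases List.pairwise_cons.mp hp with ⟨_, hp'⟩
        refine ⟨?_, hp'⟩
        rcases List.mem_cons.mp hm with h' | h'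
        · exact absurd h' (by decide)
        · exact h'
    · simp only [List.foldl_cons, hpStep_oc]
      rw [hp_close t ht (n + 1)]
      constructor
      · intro hno
        refine ⟨by simp, List.Pairwise.cons ?_ ?_⟩
        · intro c hc
          rcases ht c hc with h' | h'
          · exact absurd (h' ▸ hc) hno
          · simp [h']
        · have hall : ∀ c ∈ t, c = ')' := by
            intro c hc; rcases ht c hc with h' | h'
            · exact absurd (h' ▸ hc) hno
            · exact h'
          exact List.pairwise_of_forall_mem_list (fun a ha b hb => by rw [hall a ha, hall b hb])
      · rintro ⟨_, hp⟩
        intro hmem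
        rcases List.pairwise_cons.mp hp with ⟨hle, _⟩
        have := hle '(' hmem
        revert this; decide

-- ===== VERDICT (by name: the statement is the Claim_ definition above) =====
theorem single_hp_spec : Claim_equal_single_hp := by
  intro vstr _
  unfold Spec_single_hp single_hp single_hp_alt
  dsimp only
  rw [foldl_hpStep_filter]
  set bs := vstr.toList.filter (fun c => c == '(' || c == ')') with hbs
  have hbr : ∀ c ∈ bs, c = '(' ∨ c = ')' := by
    intro c hc
    have := List.of_mem_filter hc
    simpa using this
  have hchar := hp_open bs hbr 0
  simp only [zero_add] at hchar
  rw [Bool.eq_iff_iff]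
  simp only [beq_iff_eq, Bool.and_eq_true, List.contains_eq_mem, decide_eq_true_eq]
  rw [hchar]
  constructor
  · rintro ⟨hm, hp⟩
    exact ⟨hm, (PySem.List.sorted_eq_self_of_pairwise bs (fun x => x) (by simpa using hp)).symm⟩
  · rintro ⟨hm, he⟩
    refine ⟨hm, ?_⟩
    have := PySem.List.sorted_pairwise bs (fun x => x)
    rw [← he] at this
    simpa using this
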